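-- pv_equiv track=rewrite | github.com/baiyang20201207/baiyang20201207.github.io | python学习/1226.py | printfu
-- ===== SOURCE A (Python) =====
-- def printfu(num,len):
--     restring=""
--     for i in range(len*2):
--         if num>0:
--             if i>=num and i<num*2:
--                 restring+="*"
--             else:
--                 restring+=" "
--         else:
--             tep=-1*num;
--             if i < (len*2-tep) and i >= (len*2-tep*2):
--                 restring+="*"
--             else:
--                 restring+=" "
--     return restring
-- ===== SOURCE B (Python) =====
-- def printfu(num, len):
--     total = len * 2
--     if num > 0:
--         lo, hi = num, num * 2
--     else:
--         tep = -num
--         lo, hi = total - 2 * tep, total - tep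
--     a = min(max(lo, 0), total)
--     h = min(max(hi, 0), total)
--     return " " * a + "*" * (h - a) + " " * (total - h)
-- ===== Notes on version B (the rewrite author's own statement) =====
-- stated objective: faster
-- what changed: Replaces the per-character loop over range(len*2) with a closed-form computation of the star interval [lo,hi) clamped to [0,len*2], producing the result as three string multiplications.
import Mathlib
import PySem

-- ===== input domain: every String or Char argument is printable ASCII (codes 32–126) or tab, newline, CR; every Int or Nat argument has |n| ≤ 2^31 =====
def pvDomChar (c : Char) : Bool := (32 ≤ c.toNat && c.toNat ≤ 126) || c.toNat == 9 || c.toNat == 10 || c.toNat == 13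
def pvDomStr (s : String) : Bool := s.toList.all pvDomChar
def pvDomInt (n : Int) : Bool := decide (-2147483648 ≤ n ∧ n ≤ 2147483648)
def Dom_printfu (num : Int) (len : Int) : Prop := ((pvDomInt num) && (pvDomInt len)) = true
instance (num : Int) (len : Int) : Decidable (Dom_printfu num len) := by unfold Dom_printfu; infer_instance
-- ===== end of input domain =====

-- B replaces A's per-character loop by a closed-form clamped star interval built
-- from three character-block replications (objective: faster, constant-factor).

-- ===== PORT A =====
-- the accumulated Python string is carried as its List Char; String.ofList at the end
def printfu (num : Int) (len : Int) : String :=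
  let restring : List Char := []
  let restring := (PySem.List.pyRange 0 (len*2) 1).foldl (fun restring i =>
    if num > 0 then
      if i ≥ num ∧ i < num*2 then restring ++ ['*'] else restring ++ [' ']
    else
      let tep := -1*num
      if i < (len*2 - tep) ∧ i ≥ (len*2 - tep*2) then restring ++ ['*'] else restring ++ [' ']) restring
  String.ofList restring

-- ===== PORT B =====
def printfu_alt (num : Int) (len : Int) : String :=
  let total := len*2
  let lohi := if num > 0 then (num, num*2) else (total - 2*(-num), total - (-num))
  let a := min (max lohi.1 0) total
  let h := min (max lohi.2 0) total
  String.ofList (List.replicate a.toNat ' ' ++ (List.replicate (h-a).toNat '*' ++ List.replicate ((total-h)).toNat ' '))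

-- ===== PRECONDITION & SPEC =====
def Spec_printfu (num : Int) (len : Int) (out : String) : Prop := out = printfu_alt num len
instance (num : Int) (len : Int) (out : String) : Decidable (Spec_printfu num len out) := by unfold Spec_printfu; infer_instance

-- ===== CLAIM (what is proved, stated in full; the proofs are below) =====
def Claim_equal_printfu : Prop := ∀ (num : Int) (len : Int), Dom_printfu num len → Spec_printfu num len (printfu num len)

-- ===== LEMMAS AND PROOFS =====

-- a range of characters classified by membership in the interval [lo,hi) splits
-- into three constant blocks
theorem pv_blocks (lo hi : Int) (hlh : lo ≤ hi) (n : Nat) :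
    (List.range n).map (fun (k : Nat) => if lo ≤ (k:Int) ∧ (k:Int) < hi then '*' else ' ')
    = List.replicate (min (max lo 0) (n:Int)).toNat ' '
      ++ (List.replicate ((min (max hi 0) (n:Int)) - (min (max lo 0) (n:Int))).toNat '*'
      ++ List.replicate ((n:Int) - min (max hi 0) (n:Int)).toNat ' ') := by
  induction n with
  | zero =>
    simp
  | succ n ih =>
    rw [List.range_succ, List.map_append, ih]
    by_cases h1 : (n:Int) < lo
    · have ha : (min (max lo 0) ((n+1:Nat):Int)).toNat = (min (max lo 0) (n:Int)).toNat + 1 := by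
        push_cast; omega
      have hb : ((min (max hi 0) ((n+1:Nat):Int)) - (min (max lo 0) ((n+1:Nat):Int))).toNat
          = ((min (max hi 0) (n:Int)) - (min (max lo 0) (n:Int))).toNat := by
        push_cast; omega
      have hb0 : ((min (max hi 0) (n:Int)) - (min (max lo 0) (n:Int))).toNat = 0 := by omega
      have hc : (((n+1:Nat):Int) - min (max hi 0) ((n+1:Nat):Int)).toNat
          = ((n:Int) - min (max hi 0) (n:Int)).toNat := by
        push_cast; omega
      have hc0 : ((n:Int) - min (max hi 0) (n:Int)).toNat = 0 := by omega
      rw [ha, hb, hc, hb0, hc0]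
      simp [List.replicate_succ' ]
      omega
    · by_cases h2 : (n:Int) < hi
      · have ha : (min (max lo 0) ((n+1:Nat):Int)).toNat = (min (max lo 0) (n:Int)).toNat := by
          push_cast; omega
        have hb : ((min (max hi 0) ((n+1:Nat):Int)) - (min (max lo 0) ((n+1:Nat):Int))).toNat
            = ((min (max hi 0) (n:Int)) - (min (max lo 0) (n:Int))).toNat + 1 := by
          push_cast; omega
        have hc : (((n+1:Nat):Int) - min (max hi 0) ((n+1:Nat):Int)).toNat = 0 := by
          push_cast; omega
        have hc0 : ((n:Int) - min (max hi 0) (n:Int)).toNat = 0 := by omega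
        rw [ha, hb, hc, hc0]
        simp [List.replicate_succ']
        omega
      · have ha : (min (max lo 0) ((n+1:Nat):Int)).toNat = (min (max lo 0) (n:Int)).toNat := by
          push_cast; omega
        have hb : ((min (max hi 0) ((n+1:Nat):Int)) - (min (max lo 0) ((n+1:Nat):Int))).toNat
            = ((min (max hi 0) (n:Int)) - (min (max lo 0) (n:Int))).toNat := by
          push_cast; omega
        have hc : (((n+1:Nat):Int) - min (max hi 0) ((n+1:Nat):Int)).toNat
            = ((n:Int) - min (max hi 0) (n:Int)).toNat + 1 := by
          push_cast; omega
        rw [ha, hb, hc]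
        simp [List.replicate_succ']
        omega


-- the ported loop of A, with its branch condition in interval form, equals B's three blocks
theorem pv_fold (total lo hi : Int) (hlh : lo ≤ hi) :
    (PySem.List.pyRange 0 total 1).foldl
        (fun acc i => acc ++ [if lo ≤ i ∧ i < hi then '*' else ' ']) ([] : List Char)
    = List.replicate (min (max lo 0) total).toNat ' '
      ++ (List.replicate ((min (max hi 0) total) - (min (max lo 0) total)).toNat '*'
      ++ List.replicate ((total - min (max hi 0) total)).toNat ' ') := by
  rw [PySem.List.foldl_append_singleton_eq_map, PySem.List.pyRange_one, List.map_map]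
  simp only [Int.sub_zero, Function.comp_def, zero_add, List.nil_append]
  by_cases ht : 0 ≤ total
  · rw [pv_blocks lo hi hlh total.toNat, Int.toNat_of_nonneg ht]
  · have h0 : total.toNat = 0 := by omega
    rw [h0]
    have ha : (min (max lo 0) total).toNat = 0 := by omega
    have hb : ((min (max hi 0) total) - (min (max lo 0) total)).toNat = 0 := by omega
    have hc : (total - min (max hi 0) total).toNat = 0 := by omega
    rw [ha, hb, hc]
    simp

-- ===== VERDICT (by name: the statement is the Claim_ definition above) =====
theorem printfu_spec : Claim_equal_printfu := by
  intro num len _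
  show printfu num len = printfu_alt num len
  simp only [printfu, printfu_alt]
  by_cases hn : num > 0
  · simp only [if_pos hn]
    have hbody : ∀ (acc : List Char) (i : Int),
        (if i ≥ num ∧ i < num*2 then acc ++ ['*'] else acc ++ [' '])
        = acc ++ [if num ≤ i ∧ i < num*2 then '*' else ' '] := by
      intro acc i; split_ifs <;> rfl
    simp only [hbody]
    rw [pv_fold (len*2) num (num*2) (by omega)]
  · simp only [if_neg hn]
    have hbody : ∀ (acc : List Char) (i : Int),
        (if i < (len*2 - -1*num) ∧ i ≥ (len*2 - (-1*num)*2) then acc ++ ['*'] else acc ++ [' '])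
        = acc ++ [if (len*2 - 2*(-num)) ≤ i ∧ i < (len*2 - -num) then '*' else ' '] := by
      intro acc i; split_ifs with h1 h2 <;> first | rfl | (exfalso; omega)
    simp only [hbody]
    rw [pv_fold (len*2) (len*2 - 2*(-num)) (len*2 - -num) (by omega)]
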